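-- pv_equiv track=rewrite | github.com/nikdevadoss/coinTrackerTakeHome | algorithm.py | detect_transfers
-- ===== SOURCE A (Python) =====
-- def detect_transfers(transactions):
--     transfers = []
--     for i in range(0, len(transactions)):
--         for j in range(0, len(transactions)):
--             if i != j and matchingTransactions(transactions[i], transactions[j]):
--                 transfers.append((transactions[i][0], transactions[j][0]))
--                 transactions[i] = None
--                 transactions[j] = None
--                 break
--     return transfers
--
-- def matchingTransactions(transactionA, transactionB):
--     if (transactionA != None and transactionB != None) and transactionA[3] != transactionB[3] and transactionA[1] != transactionB[1] and transactionA[4] == transactionB[4] and transactionA[2] == transactionB[2]: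
--         return True
--     return False
-- ===== SOURCE B (Python) =====
-- def detect_transfers(transactions):
--     # Bucket indices by (amount, currency) once, so each outer step only scans
--     # its own bucket instead of the whole list.  Same greedy order and same
--     # in-place None-ing of matched entries as the original.
--     buckets = {}
--     for idx, t in enumerate(transactions):
--         if t is not None:
--             buckets.setdefault((t[2], t[4]), []).append(idx)
--     transfers = []
--     for i in range(len(transactions)):
--         ti = transactions[i]
--         if ti is None:
--             continue
--         for j in buckets.get((ti[2], ti[4]), []):
--             tj = transactions[j]
--             if j != i and tj is not None and tj[1] != ti[1] and tj[3] != ti[3]: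
--                 transfers.append((ti[0], tj[0]))
--                 transactions[i] = None
--                 transactions[j] = None
--                 break
--     return transfers
-- ===== Notes on version B (the rewrite author's own statement) =====
-- stated objective: faster
-- what changed: Instead of rescanning the whole list for every i, B builds a (amount, currency) -> ascending index-list bucket table once and each outer step scans only its own bucket for the first still-unmatched partner with differing wallet and direction, preserving A's greedy order, output and in-place None-ing of the argument list.
import Mathlib
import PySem

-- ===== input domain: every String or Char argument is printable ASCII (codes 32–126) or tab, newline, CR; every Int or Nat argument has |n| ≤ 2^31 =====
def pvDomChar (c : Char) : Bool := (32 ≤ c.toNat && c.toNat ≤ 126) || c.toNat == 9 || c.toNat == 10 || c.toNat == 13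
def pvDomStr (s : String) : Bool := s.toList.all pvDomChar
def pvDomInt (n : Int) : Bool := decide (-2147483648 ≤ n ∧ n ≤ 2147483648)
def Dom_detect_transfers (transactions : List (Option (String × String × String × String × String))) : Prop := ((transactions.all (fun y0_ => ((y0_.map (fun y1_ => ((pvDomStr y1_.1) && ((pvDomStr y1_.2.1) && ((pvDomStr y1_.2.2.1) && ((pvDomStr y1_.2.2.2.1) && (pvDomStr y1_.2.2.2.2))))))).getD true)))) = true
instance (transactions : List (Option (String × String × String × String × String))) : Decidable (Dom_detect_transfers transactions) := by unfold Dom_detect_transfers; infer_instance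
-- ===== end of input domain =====

-- B replaces A's full inner rescan by a (amount,currency) → indices bucket table built once; same
-- greedy pairing and output order.  Both Pythons also None-out matched entries of the ARGUMENT list
-- in place identically; the theorems below are about the returned list.
-- All indices the Pythons use are 0 ≤ idx < len(transactions), so Nat indices/List.range/List.getD
-- are exact ports of range(len(...)) and transactions[i] here.

abbrev PvTx := String × String × String × String × String

-- transactions[j]  (j always in range in both programs; getD none is exact there)
def pvGetO (txs : List (Option PvTx)) (j : Nat) : Option PvTx := txs.getD j none

-- t[0], only ever evaluated when the option is `some`
def pvFst0 (o : Option PvTx) : String := match o with | some t => t.1 | none => ""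

-- ===== PORT A =====
def matchingTransactions (a b : Option PvTx) : Bool :=
  match a, b with
  | some a, some b =>
      a.2.2.2.1 != b.2.2.2.1 && a.2.1 != b.2.1 && a.2.2.2.2 == b.2.2.2.2 && a.2.2.1 == b.2.2.1
  | _, _ => false

-- body of A's outer loop: scan ALL j, first match wins (the `break`)
def pvStepA (n : Nat) (st : List (Option PvTx) × List (String × String)) (i : Nat) :
    List (Option PvTx) × List (String × String) :=
  match (List.range n).find? (fun j => !(j == i) && matchingTransactions (pvGetO st.1 i) (pvGetO st.1 j)) with
  | some j => ((st.1.set i none).set j none,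
               st.2 ++ [(pvFst0 (pvGetO st.1 i), pvFst0 (pvGetO st.1 j))])
  | none => st

def detect_transfers (transactions : List (Option PvTx)) : List (String × String) :=
  ((List.range transactions.length).foldl (pvStepA transactions.length) (transactions, [])).2

-- ===== PORT B =====
def pvKey (t : PvTx) : String × String := (t.2.2.1, t.2.2.2.2)

-- buckets.setdefault((t[2],t[4]), []).append(idx)  over enumerate(transactions)
def pvBuckets (txs : List (Option PvTx)) : PySem.Dict (String × String) (List Nat) :=
  txs.zipIdx.foldl
    (fun d p => match p.1 with
      | some t => d.modify (pvKey t) [] (fun l => l ++ [p.2])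
      | none => d)
    PySem.Dict.empty

-- body of B's outer loop: scan only the (amount,currency) bucket
def pvStepB (buckets : PySem.Dict (String × String) (List Nat))
    (st : List (Option PvTx) × List (String × String)) (i : Nat) :
    List (Option PvTx) × List (String × String) :=
  match pvGetO st.1 i with
  | none => st
  | some ti =>
    match (buckets.getD (pvKey ti) []).find?
        (fun j => !(j == i) &&
          (match pvGetO st.1 j with
           | some tj => tj.2.1 != ti.2.1 && tj.2.2.2.1 != ti.2.2.2.1
           | none => false)) with
    | some j => ((st.1.set i none).set j none, st.2 ++ [(ti.1, pvFst0 (pvGetO st.1 j))])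
    | none => st

def detect_transfers_alt (transactions : List (Option PvTx)) : List (String × String) :=
  let buckets := pvBuckets transactions
  ((List.range transactions.length).foldl (pvStepB buckets) (transactions, [])).2

-- ===== PRECONDITION & SPEC =====
def Spec_detect_transfers (transactions : List (Option (String × String × String × String × String))) (out : List (String × String)) : Prop := out = detect_transfers_alt transactions
instance (transactions : List (Option (String × String × String × String × String))) (out : List (String × String)) : Decidable (Spec_detect_transfers transactions out) := by unfold Spec_detect_transfers; infer_instance

-- ===== CLAIM (what is proved, stated in full; the proofs are below) =====
def Claim_equal_detect_transfers : Prop := ∀ (transactions : List (Option (String × String × String × String × String))), Dom_detect_transfers transactions → Spec_detect_transfers transactions (detect_transfers transactions)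

-- ===== LEMMAS AND PROOFS =====

-- the loop invariant: the working list has the original entries, except some set to none
def PvInv (txs0 txs : List (Option PvTx)) : Prop :=
  txs.length = txs0.length ∧ ∀ j : Nat, pvGetO txs j = pvGetO txs0 j ∨ pvGetO txs j = none

lemma pvInv_refl (txs0 : List (Option PvTx)) : PvInv txs0 txs0 :=
  ⟨rfl, fun _ => Or.inl rfl⟩

lemma pvInv_set {txs0 txs : List (Option PvTx)} (h : PvInv txs0 txs) (i : Nat) :
    PvInv txs0 (txs.set i none) := by
  refine ⟨by simpa using h.1, fun j => ?_⟩
  by_cases hij : i = j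
  · subst hij
    by_cases hlt : i < txs.length
    · right; simp [pvGetO, List.getD, hlt]
    · rw [List.set_eq_of_length_le (le_of_not_gt hlt)]; exact h.2 i
  · have heq : pvGetO (txs.set i none) j = pvGetO txs j := by
      simp [pvGetO, List.getD, hij]
    rw [heq]; exact h.2 j

-- the filter that carves a key's bucket out of the original list
def pvQ (txs0 : List (Option PvTx)) (k : String × String) (j : Nat) : Bool :=
  match pvGetO txs0 j with
  | some t => pvKey t == k
  | none => false

-- bucket characterisation: the bucket of key k lists, in ascending order, exactly the indices
-- of the ORIGINAL non-none entries with that key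
lemma pvBuckets_getD (txs0 : List (Option PvTx)) (k : String × String) :
    (pvBuckets txs0).getD k [] = (List.range txs0.length).filter (pvQ txs0 k) := by
  induction txs0 using List.reverseRecOn with
  | nil => rfl
  | append_singleton l x ih =>
    have hstep : pvBuckets (l ++ [x]) =
        (match x with
         | some t => (pvBuckets l).modify (pvKey t) [] (fun b => b ++ [l.length])
         | none => pvBuckets l) := by
      simp [pvBuckets, List.zipIdx_append, List.foldl_append]
    have hlen : pvGetO (l ++ [x]) l.length = x := by
      simp [pvGetO, List.getD]
    have hagree : ∀ j ∈ List.range l.length, pvQ (l ++ [x]) k j = pvQ l k j := by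
      intro j hj
      have hj' : j < l.length := List.mem_range.mp hj
      have : pvGetO (l ++ [x]) j = pvGetO l j := by
        simp [pvGetO, List.getD, List.getElem?_append_left hj']
      simp [pvQ, this]
    have hrange : (List.range (l ++ [x]).length).filter (pvQ (l ++ [x]) k) =
        (List.range l.length).filter (pvQ l k) ++
          (if pvQ (l ++ [x]) k l.length then [l.length] else []) := by
      rw [List.length_append, List.length_singleton, List.range_succ, List.filter_append,
        List.filter_congr hagree]
      simp [List.filter]
      cases pvQ (l ++ [x]) k l.length <;> simp
    rw [hstep, hrange]
    cases x with
    | none =>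
      have hq : pvQ (l ++ [none]) k l.length = false := by simp [pvQ, hlen]
      simp [hq, ih]
    | some t =>
      have hqt : pvQ (l ++ [some t]) k l.length = (pvKey t == k) := by simp [pvQ, hlen]
      by_cases hk : k = pvKey t
      · subst hk
        rw [PySem.Dict.getD_modify, if_pos rfl, ih]
        simp [hqt]
      · have hf : (pvKey t == k) = false := beq_eq_false_iff_ne.mpr (fun h => hk h.symm)
        rw [PySem.Dict.getD_modify, if_neg hk, ih]
        simp [hqt, hf]

-- find? over the whole list equals find? over a filtered sublist when the predicate implies the filter
lemma pv_find?_filter {α : Type} (l : List α) (p q : α → Bool)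
    (h : ∀ x ∈ l, p x = true → q x = true) :
    l.find? p = (l.filter q).find? p := by
  induction l with
  | nil => rfl
  | cons x xs ih =>
    have ih' := ih (fun y hy => h y (List.mem_cons_of_mem _ hy))
    by_cases hq : q x = true
    · rw [List.filter_cons_of_pos hq]
      cases hp : p x with
      | true => rw [List.find?_cons_of_pos hp, List.find?_cons_of_pos hp]
      | false => rw [List.find?_cons_of_neg (by simp [hp]), List.find?_cons_of_neg (by simp [hp]), ih']
    · have hp : p x = false := by
        cases hpx : p x
        · rfl
        · exact absurd (h x List.mem_cons_self hpx) hq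
      rw [List.filter_cons_of_neg (by simpa using hq), List.find?_cons_of_neg (by simp [hp]), ih']

lemma pv_find?_congr {α : Type} (l : List α) (p q : α → Bool)
    (h : ∀ x ∈ l, p x = q x) : l.find? p = l.find? q := by
  induction l with
  | nil => rfl
  | cons x xs ih =>
    have hx := h x List.mem_cons_self
    have ih' := ih (fun y hy => h y (List.mem_cons_of_mem _ hy))
    cases hq : q x with
    | true => rw [List.find?_cons_of_pos (hx.trans hq), List.find?_cons_of_pos hq]
    | false => rw [List.find?_cons_of_neg (by simp [hx, hq]), List.find?_cons_of_neg (by simp [hq]), ih']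

-- the two loop bodies agree on invariant states
lemma pvStep_eq (txs0 : List (Option PvTx)) (st : List (Option PvTx) × List (String × String))
    (i : Nat) (hinv : PvInv txs0 st.1) :
    pvStepA txs0.length st i = pvStepB (pvBuckets txs0) st i := by
  cases hi : pvGetO st.1 i with
  | none =>
    have hnone : (List.range txs0.length).find?
        (fun j => !(j == i) && matchingTransactions none (pvGetO st.1 j)) = none := by
      apply List.find?_eq_none.mpr
      intro j _
      simp [matchingTransactions]
    simp [pvStepA, pvStepB, hi, hnone]
  | some ti =>
    have himp : ∀ j ∈ List.range txs0.length,
        (!(j == i) && matchingTransactions (pvGetO st.1 i) (pvGetO st.1 j)) = true →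
        pvQ txs0 (pvKey ti) j = true := by
      intro j _ hj
      rw [Bool.and_eq_true] at hj
      have hm := hj.2
      cases hjv : pvGetO st.1 j with
      | none => rw [hi, hjv] at hm; simp [matchingTransactions] at hm
      | some tj =>
        rw [hi, hjv] at hm
        simp only [matchingTransactions, Bool.and_eq_true, beq_iff_eq] at hm
        have h0 : pvGetO txs0 j = some tj := by
          rcases hinv.2 j with hh | hh
          · rw [← hh, hjv]
          · rw [hjv] at hh; exact absurd hh (by simp)
        simp [pvQ, h0, pvKey, hm.1.2.symm, hm.2.symm]
    have hcongr : ∀ j ∈ (List.range txs0.length).filter (pvQ txs0 (pvKey ti)),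
        (!(j == i) && matchingTransactions (pvGetO st.1 i) (pvGetO st.1 j)) =
        (!(j == i) && (match pvGetO st.1 j with
           | some tj => tj.2.1 != ti.2.1 && tj.2.2.2.1 != ti.2.2.2.1
           | none => false)) := by
      intro j hj
      have hq := (List.mem_filter.mp hj).2
      cases hjv : pvGetO st.1 j with
      | none => simp [hi, matchingTransactions]
      | some tj =>
        have h0 : pvGetO txs0 j = some tj := by
          rcases hinv.2 j with hh | hh
          · rw [← hh, hjv]
          · rw [hjv] at hh; exact absurd hh (by simp)
        simp only [pvQ, h0, pvKey, beq_iff_eq, Prod.mk.injEq] at hq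
        simp only [hi, matchingTransactions, hq.1, hq.2, beq_self_eq_true, Bool.and_true]
        cases hij : (j == i) with
        | true => simp
        | false =>
          simp only [Bool.not_false, Bool.true_and]
          cases h1 : ti.2.2.2.1 == tj.2.2.2.1 <;> cases h2 : ti.2.1 == tj.2.1 <;>
            simp [bne, h1, h2, BEq.comm]
    have hfind : (List.range txs0.length).find?
        (fun j => !(j == i) && matchingTransactions (pvGetO st.1 i) (pvGetO st.1 j)) =
        ((pvBuckets txs0).getD (pvKey ti) []).find?
          (fun j => !(j == i) && (match pvGetO st.1 j with
             | some tj => tj.2.1 != ti.2.1 && tj.2.2.2.1 != ti.2.2.2.1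
             | none => false)) := by
      rw [pvBuckets_getD txs0 (pvKey ti),
        pv_find?_filter (List.range txs0.length) _ (pvQ txs0 (pvKey ti)) himp]
      exact pv_find?_congr _ _ _ hcongr
    rw [hi] at hfind
    simp only [pvStepA, pvStepB, hi, hfind]
    cases (((pvBuckets txs0).getD (pvKey ti) []).find?
          (fun j => !(j == i) && (match pvGetO st.1 j with
             | some tj => tj.2.1 != ti.2.1 && tj.2.2.2.1 != ti.2.2.2.1
             | none => false))) with
    | none => rfl
    | some j => simp [pvFst0]

lemma pvStep_inv (txs0 : List (Option PvTx)) (st : List (Option PvTx) × List (String × String))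
    (i : Nat) (hinv : PvInv txs0 st.1) : PvInv txs0 (pvStepA txs0.length st i).1 := by
  unfold pvStepA
  cases hf : (List.range txs0.length).find? (fun j => !(j == i) && matchingTransactions (pvGetO st.1 i) (pvGetO st.1 j)) with
  | none => simpa using hinv
  | some j => exact pvInv_set (pvInv_set hinv i) j

lemma pv_foldl_eq (txs0 : List (Option PvTx)) (l : List Nat)
    (st : List (Option PvTx) × List (String × String)) (hinv : PvInv txs0 st.1) :
    l.foldl (pvStepA txs0.length) st = l.foldl (pvStepB (pvBuckets txs0)) st := by
  induction l generalizing st with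
  | nil => rfl
  | cons i l ih =>
    simp only [List.foldl_cons]
    rw [← pvStep_eq txs0 st i hinv]
    exact ih _ (pvStep_inv txs0 st i hinv)

-- ===== VERDICT (by name: the statement is the Claim_ definition above) =====
theorem detect_transfers_spec : Claim_equal_detect_transfers := by
  intro transactions _
  unfold Spec_detect_transfers detect_transfers detect_transfers_alt
  rw [pv_foldl_eq transactions _ _ (pvInv_refl transactions)]
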